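-- pv_equiv track=rewrite | github.com/NikShep21/klimenkole_cv | trex/main.py | merge_close_rects
-- ===== SOURCE A (Python) =====
-- def merge_close_rects(rects, gap):
--     if not rects:
--         return []
--
--     rects = sorted(rects, key=lambda r: r[0])
--     merged = []
--     cur = rects[0]
--
--     for next_rect in rects[1:]:
--         x, y, w, h = next_rect
--         if x <= cur[0] + cur[2] + gap:
--             new_x = cur[0]
--             new_w = max(cur[0] + cur[2], x + w) - new_x
--             new_y = min(cur[1], y)
--             new_h = max(cur[1] + cur[3], y + h) - new_y
--             cur = (new_x, new_y, new_w, new_h)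
--         else:
--             merged.append(cur)
--             cur = next_rect
--     merged.append(cur)
--     return merged
-- ===== SOURCE B (Python) =====
-- def merge_close_rects(rects, gap):
--     if not rects:
--         return []
--     srt = sorted(rects, key=lambda r: r[0])
--     # grouping pass: collect runs of horizontally close rects
--     groups = []
--     cur_group = [srt[0]]
--     right = srt[0][0] + srt[0][2]
--     for r in srt[1:]:
--         if r[0] <= right + gap:
--             cur_group.append(r)
--             right = max(right, r[0] + r[2])
--         else:
--             groups.append(cur_group)
--             cur_group = [r]
--             right = r[0] + r[2]
--     groups.append(cur_group)
--     # reduction pass: each group becomes its bounding box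
--     out = []
--     for g in groups:
--         if len(g) == 1:
--             out.append(g[0])
--         else:
--             min_x = g[0][0]  # sorted by x, so first rect is leftmost
--             min_y = min(r[1] for r in g)
--             max_r = max(r[0] + r[2] for r in g)
--             max_b = max(r[1] + r[3] for r in g)
--             out.append((min_x, min_y, max_r - min_x, max_b - min_y))
--     return out
-- ===== Notes on version B (the rewrite author's own statement) =====
-- stated objective: alternative
-- what changed: Replaces A's single fold that rebuilds the merged rectangle incrementally at each step with a two-phase algorithm: a grouping pass that only tracks the running right edge, then a reduction pass that turns each group into its bounding box (single-rect groups pass through unchanged).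
import Mathlib
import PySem

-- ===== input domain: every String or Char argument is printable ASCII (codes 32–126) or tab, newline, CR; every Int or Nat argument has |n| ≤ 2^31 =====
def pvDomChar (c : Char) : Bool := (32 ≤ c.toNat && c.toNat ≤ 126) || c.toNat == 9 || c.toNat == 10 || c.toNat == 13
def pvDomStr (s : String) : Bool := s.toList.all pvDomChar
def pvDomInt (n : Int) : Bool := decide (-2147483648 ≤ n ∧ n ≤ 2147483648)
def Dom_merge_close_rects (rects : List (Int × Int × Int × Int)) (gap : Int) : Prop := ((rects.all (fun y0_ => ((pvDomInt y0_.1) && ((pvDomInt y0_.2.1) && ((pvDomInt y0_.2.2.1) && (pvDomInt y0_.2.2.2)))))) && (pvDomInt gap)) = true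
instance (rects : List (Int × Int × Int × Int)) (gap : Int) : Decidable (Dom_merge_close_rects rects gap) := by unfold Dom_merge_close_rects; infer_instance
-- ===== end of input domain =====

-- B restructures A's single incremental-merge fold into a grouping pass (tracking only the
-- running right edge) followed by a reduction pass turning each group into its bounding box
-- (objective: alternative decomposition, same cost).

-- ===== PORT A =====
-- A's merge of the accumulated rect `cur` with the next rect `nr`
def pvMergeStepA (cur nr : Int × Int × Int × Int) : Int × Int × Int × Int :=
  (cur.1, min cur.2.1 nr.2.1,
   max (cur.1 + cur.2.2.1) (nr.1 + nr.2.2.1) - cur.1,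
   max (cur.2.1 + cur.2.2.2) (nr.2.1 + nr.2.2.2) - min cur.2.1 nr.2.1)

-- A's `for next_rect in rects[1:]` loop over state (cur, merged)
def pvLoopA (gap : Int) : List (Int × Int × Int × Int) → (Int × Int × Int × Int) →
    List (Int × Int × Int × Int) → List (Int × Int × Int × Int)
  | [], cur, merged => merged ++ [cur]
  | nr :: rest, cur, merged =>
      if nr.1 ≤ cur.1 + cur.2.2.1 + gap then
        pvLoopA gap rest (pvMergeStepA cur nr) merged
      else
        pvLoopA gap rest nr (merged ++ [cur])

def merge_close_rects (rects : List (Int × Int × Int × Int)) (gap : Int) : List (Int × Int × Int × Int) :=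
  match PySem.List.sorted rects (fun r => r.1) with
  | [] => []
  | r :: rest => pvLoopA gap rest r []

-- ===== PORT B =====
-- grouping pass: state (current group, its running right edge, closed groups)
def pvGroupB (gap : Int) : List (Int × Int × Int × Int) → List (Int × Int × Int × Int) → Int →
    List (List (Int × Int × Int × Int)) → List (List (Int × Int × Int × Int))
  | [], g, _, acc => acc ++ [g]
  | r :: rest, g, right, acc =>
      if r.1 ≤ right + gap then
        pvGroupB gap rest (g ++ [r]) (max right (r.1 + r.2.2.1)) acc
      else
        pvGroupB gap rest [r] (r.1 + r.2.2.1) (acc ++ [g])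

-- min(r[1] for r in g), max(r[0]+r[2] for r in g), max(r[1]+r[3] for r in g)
def pvMinY : List (Int × Int × Int × Int) → Int
  | [] => 0
  | a :: rest => rest.foldl (fun m s => min m s.2.1) a.2.1
def pvMaxR : List (Int × Int × Int × Int) → Int
  | [] => 0
  | a :: rest => rest.foldl (fun m s => max m (s.1 + s.2.2.1)) (a.1 + a.2.2.1)
def pvMaxB : List (Int × Int × Int × Int) → Int
  | [] => 0
  | a :: rest => rest.foldl (fun m s => max m (s.2.1 + s.2.2.2)) (a.2.1 + a.2.2.2)

-- reduction pass: a group of one passes through, else its bounding box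
def pvReduceB (g : List (Int × Int × Int × Int)) : Int × Int × Int × Int :=
  match g with
  | [] => (0, 0, 0, 0)   -- unreachable: groups are nonempty
  | [r] => r
  | a :: _ => (a.1, pvMinY g, pvMaxR g - a.1, pvMaxB g - pvMinY g)

def merge_close_rects_alt (rects : List (Int × Int × Int × Int)) (gap : Int) : List (Int × Int × Int × Int) :=
  match PySem.List.sorted rects (fun r => r.1) with
  | [] => []
  | r :: rest => (pvGroupB gap rest [r] (r.1 + r.2.2.1) []).map pvReduceB

-- ===== PRECONDITION & SPEC =====
def Spec_merge_close_rects (rects : List (Int × Int × Int × Int)) (gap : Int) (out : List (Int × Int × Int × Int)) : Prop := out = merge_close_rects_alt rects gap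
instance (rects : List (Int × Int × Int × Int)) (gap : Int) (out : List (Int × Int × Int × Int)) : Decidable (Spec_merge_close_rects rects gap out) := by unfold Spec_merge_close_rects; infer_instance

-- ===== CLAIM (what is proved, stated in full; the proofs are below) =====
def Claim_equal_merge_close_rects : Prop := ∀ (rects : List (Int × Int × Int × Int)) (gap : Int), Dom_merge_close_rects rects gap → Spec_merge_close_rects rects gap (merge_close_rects rects gap)

-- ===== LEMMAS AND PROOFS =====

theorem pvMinY_append (a : Int × Int × Int × Int) (g : List (Int × Int × Int × Int))
    (r : Int × Int × Int × Int) :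
    pvMinY ((a :: g) ++ [r]) = min (pvMinY (a :: g)) r.2.1 := by
  simp [pvMinY, List.foldl_append]

theorem pvMaxR_append (a : Int × Int × Int × Int) (g : List (Int × Int × Int × Int))
    (r : Int × Int × Int × Int) :
    pvMaxR ((a :: g) ++ [r]) = max (pvMaxR (a :: g)) (r.1 + r.2.2.1) := by
  simp [pvMaxR, List.foldl_append]

theorem pvMaxB_append (a : Int × Int × Int × Int) (g : List (Int × Int × Int × Int))
    (r : Int × Int × Int × Int) :
    pvMaxB ((a :: g) ++ [r]) = max (pvMaxB (a :: g)) (r.2.1 + r.2.2.2) := by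
  simp [pvMaxB, List.foldl_append]

-- reduceB of a nonempty group, written uniformly via the three folds
theorem pvReduceB_eq (a : Int × Int × Int × Int) (g : List (Int × Int × Int × Int)) :
    pvReduceB (a :: g) = (a.1, pvMinY (a :: g), pvMaxR (a :: g) - a.1, pvMaxB (a :: g) - pvMinY (a :: g)) := by
  cases g with
  | nil =>
      obtain ⟨x, y, w, h⟩ := a
      simp only [pvReduceB, pvMinY, pvMaxR, pvMaxB, List.foldl_nil, Prod.mk.injEq, true_and]
      omega
  | cons b t => rfl

-- A's incremental merge step equals appending to the group and re-reducing
theorem pvReduceB_snoc (a : Int × Int × Int × Int) (g : List (Int × Int × Int × Int))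
    (r : Int × Int × Int × Int) :
    pvReduceB ((a :: g) ++ [r]) = pvMergeStepA (pvReduceB (a :: g)) r := by
  have h1 : (a :: g) ++ [r] = a :: (g ++ [r]) := rfl
  rw [h1, pvReduceB_eq a (g ++ [r]), pvReduceB_eq a g, ← h1,
      pvMinY_append, pvMaxR_append, pvMaxB_append]
  obtain ⟨x, y, w, h⟩ := r
  simp only [pvMergeStepA, Prod.mk.injEq, true_and]
  omega

-- the running right edge of a nonempty group is head.x + head.w of its reduction
theorem pvReduceB_right (a : Int × Int × Int × Int) (g : List (Int × Int × Int × Int)) :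
    (pvReduceB (a :: g)).1 + (pvReduceB (a :: g)).2.2.1 = pvMaxR (a :: g) := by
  rw [pvReduceB_eq]
  simp only []
  omega

-- main invariant: A's loop over (reduce g, map reduce acc) tracks B's grouping pass
theorem pvLoop_eq (gap : Int) (rest : List (Int × Int × Int × Int)) :
    ∀ (a : Int × Int × Int × Int) (g : List (Int × Int × Int × Int))
      (acc : List (List (Int × Int × Int × Int))),
      pvLoopA gap rest (pvReduceB (a :: g)) (acc.map pvReduceB)
        = (pvGroupB gap rest (a :: g) (pvMaxR (a :: g)) acc).map pvReduceB := by
  induction rest with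
  | nil => intro a g acc; simp [pvLoopA, pvGroupB]
  | cons r rest ih =>
      intro a g acc
      simp only [pvLoopA, pvGroupB, pvReduceB_right]
      by_cases hc : r.1 ≤ pvMaxR (a :: g) + gap
      · rw [if_pos hc, if_pos hc, ← pvReduceB_snoc, ← pvMaxR_append]
        exact ih a (g ++ [r]) acc
      · rw [if_neg hc, if_neg hc]
        have h2 : pvMaxR [r] = r.1 + r.2.2.1 := by simp [pvMaxR]
        have h3 : (acc ++ [a :: g]).map pvReduceB = acc.map pvReduceB ++ [pvReduceB (a :: g)] := by
          simp
        rw [← h2, ← h3]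
        have h4 : r = pvReduceB [r] := rfl
        calc pvLoopA gap rest r ((acc ++ [a :: g]).map pvReduceB)
            = pvLoopA gap rest (pvReduceB [r]) ((acc ++ [a :: g]).map pvReduceB) := by rw [← h4]
          _ = (pvGroupB gap rest [r] (pvMaxR [r]) (acc ++ [a :: g])).map pvReduceB :=
              ih r [] (acc ++ [a :: g])

-- ===== VERDICT (by name: the statement is the Claim_ definition above) =====
theorem merge_close_rects_spec : Claim_equal_merge_close_rects := by
  intro rects gap _
  unfold Spec_merge_close_rects merge_close_rects merge_close_rects_alt
  cases h : PySem.List.sorted rects (fun r => r.1) with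
  | nil => rfl
  | cons r rest =>
      have h2 : pvMaxR [r] = r.1 + r.2.2.1 := by simp [pvMaxR]
      have h4 : r = pvReduceB [r] := rfl
      calc pvLoopA gap rest r []
          = pvLoopA gap rest (pvReduceB [r]) (([] : List (List (Int × Int × Int × Int))).map pvReduceB) := by
            rw [← h4]; rfl
        _ = (pvGroupB gap rest [r] (pvMaxR [r]) []).map pvReduceB := pvLoop_eq gap rest r [] []
        _ = (pvGroupB gap rest [r] (r.1 + r.2.2.1) []).map pvReduceB := by rw [h2]
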